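-- pv_equiv track=rewrite | github.com/Sam120204/CCC_Junior | CCC/lesson1/dicts_sol.py | build_placements
-- ===== SOURCE A (Python) =====
-- def build_placements(shoes):
--     aDict = {}
--     for idx in range(len(shoes)):
--         shoe = shoes[idx]
--         if shoe in aDict:
--             aDict[shoe].append(idx+1)
--         else:
--             aDict[shoe] = [idx+1]
--     return aDict
-- ===== SOURCE B (Python) =====
-- def build_placements(shoes):
--     return {shoe: [i + 1 for i in range(len(shoes)) if shoes[i] == shoe]
--             for shoe in dict.fromkeys(shoes)}
-- ===== Notes on version B (the rewrite author's own statement) =====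
-- stated objective: alternative
-- what changed: Replaces A's single appending pass with a mutable dict by a dict comprehension over the distinct values (dict.fromkeys), each mapped to a full scan collecting its 1-based indices.
import Mathlib
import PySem

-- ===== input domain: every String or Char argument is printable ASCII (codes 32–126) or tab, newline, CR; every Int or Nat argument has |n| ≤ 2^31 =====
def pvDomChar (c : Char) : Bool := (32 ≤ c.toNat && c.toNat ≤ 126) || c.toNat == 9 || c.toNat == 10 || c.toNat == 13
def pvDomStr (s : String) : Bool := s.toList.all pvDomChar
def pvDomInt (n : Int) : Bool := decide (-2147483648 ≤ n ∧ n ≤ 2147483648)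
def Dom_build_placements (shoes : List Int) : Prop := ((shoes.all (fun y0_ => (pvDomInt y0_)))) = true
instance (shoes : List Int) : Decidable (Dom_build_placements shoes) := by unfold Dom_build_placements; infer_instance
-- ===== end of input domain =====

-- B replaces A's single appending pass over a mutable dict by a dict comprehension over
-- the distinct values (dict.fromkeys), each mapped to a full index scan (alternative decomposition).


-- ===== PORT A =====
def build_placements (shoes : List Int) : List (Int × List Int) :=
  ((PySem.List.pyRange 0 shoes.length 1).foldl (fun d idx =>
    let shoe := PySem.List.pyGetD shoes idx 0
    if d.contains shoe then d.modify shoe [] (fun xs => xs ++ [idx + 1])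
    else d.insert shoe [idx + 1]) PySem.Dict.empty).items

-- ===== PORT B =====
def build_placements_alt (shoes : List Int) : List (Int × List Int) :=
  (PySem.List.dedup shoes).map (fun shoe =>
    (shoe, ((PySem.List.pyRange 0 shoes.length 1).filter
              (fun i => PySem.List.pyGetD shoes i 0 == shoe)).map (fun i => i + 1)))

-- ===== PRECONDITION & SPEC =====
def Spec_build_placements (shoes : List Int) (out : List (Int × List Int)) : Prop := out = build_placements_alt shoes
instance (shoes : List Int) (out : List (Int × List Int)) : Decidable (Spec_build_placements shoes out) := by unfold Spec_build_placements; infer_instance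

-- ===== CLAIM (what is proved, stated in full; the proofs are below) =====
def Claim_equal_build_placements : Prop := ∀ (shoes : List Int), Dom_build_placements shoes → Spec_build_placements shoes (build_placements shoes)

-- ===== LEMMAS AND PROOFS =====

-- A's if/else branch is exactly a Dict.modify with default []
theorem pv_branch_eq (d : PySem.Dict Int (List Int)) (shoe v : Int) :
    (if d.contains shoe then d.modify shoe [] (fun xs => xs ++ [v])
     else d.insert shoe [v]) = d.modify shoe [] (fun xs => xs ++ [v]) := by
  by_cases h : d.contains shoe
  · simp [h]
  · simp [h, PySem.Dict.modify]
    rw [PySem.Dict.getD_of_not_contains]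
    · simp
    · simpa using h

theorem pv_map_getD_range (shoes : List Int) :
    (List.range shoes.length).map (fun k => shoes.getD k 0) = shoes := by
  apply List.ext_getElem
  · simp
  · intro i h1 h2
    simp [List.getD_eq_getElem?_getD, List.getElem?_eq_getElem h2]

-- A's index loop is a grouping fold over (value, 1-based index) pairs
theorem pv_foldl_eq (shoes : List Int) :
    (PySem.List.pyRange 0 shoes.length 1).foldl (fun d idx =>
      let shoe := PySem.List.pyGetD shoes idx 0
      if d.contains shoe then d.modify shoe [] (fun xs => xs ++ [idx + 1])
      else d.insert shoe [idx + 1]) PySem.Dict.empty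
    = ((List.range shoes.length).map (fun k => (shoes.getD k 0, (k : Int) + 1))).foldl
        (fun d p => d.modify p.1 [] (fun xs => xs ++ [p.2])) PySem.Dict.empty := by
  rw [PySem.List.pyRange_one, List.foldl_map, List.foldl_map]
  apply PySem.List.foldl_congr_mem
  intro d k hk
  simp [pv_branch_eq, PySem.List.pyGetD_natCast]

-- the grouping fold's items are exactly B's comprehension
theorem pv_main (shoes : List Int) :
    (((List.range shoes.length).map (fun k => (shoes.getD k 0, (k : Int) + 1))).foldl
        (fun d p => d.modify p.1 [] (fun xs => xs ++ [p.2])) PySem.Dict.empty).items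
    = (PySem.List.dedup shoes).map (fun shoe =>
        (shoe, ((PySem.List.pyRange 0 shoes.length 1).filter
              (fun i => PySem.List.pyGetD shoes i 0 == shoe)).map (fun i => i + 1))) := by
  set l := (List.range shoes.length).map (fun k => (shoes.getD k 0, (k : Int) + 1)) with hl
  set d := l.foldl (fun d p => d.modify p.1 [] (fun xs => xs ++ [p.2])) PySem.Dict.empty with hd
  have hkeys : d.keys = PySem.List.dedup shoes := by
    rw [hd, hl, List.foldl_map,
      PySem.Dict.keys_foldl_modify_key (key := fun k => shoes.getD k 0)
        (f := fun _ k => fun xs => xs ++ [(k : Int) + 1])]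
    rw [show PySem.Set.update (PySem.Dict.empty (κ := Int) (ν := List Int)).keys
          ((List.range shoes.length).map (fun k => shoes.getD k 0))
        = PySem.Set.ofList ((List.range shoes.length).map (fun k => shoes.getD k 0)) from
      PySem.Set.update_nil_left _]
    rw [pv_map_getD_range]
    simp
  have hnodup : d.keys.Nodup := by rw [hkeys]; exact PySem.List.nodup_dedup _
  have hgetD : ∀ shoe : Int, d.getD shoe []
      = ((PySem.List.pyRange 0 shoes.length 1).filter
          (fun i => PySem.List.pyGetD shoes i 0 == shoe)).map (fun i => i + 1) := by
    intro shoe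
    rw [hd, PySem.Dict.getD_foldl_modify_append]
    rw [hl, PySem.List.pyRange_one]
    simp [List.filter_map, List.map_map, Function.comp_def, PySem.List.pyGetD_natCast]
  rw [PySem.Dict.items_eq_map_keys d hnodup [], hkeys]
  apply List.map_congr_left
  intro shoe _
  rw [hgetD]

-- ===== VERDICT (by name: the statement is the Claim_ definition above) =====
theorem build_placements_spec : Claim_equal_build_placements := by
  intro shoes _
  unfold Spec_build_placements build_placements build_placements_alt
  rw [pv_foldl_eq, pv_main]
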